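-- pv_equiv track=rewrite | github.com/browntitan/Agent_Harness | src/agentic_chatbot_next/skills/dependency_graph.py | _cycle_signature
-- ===== SOURCE A (Python) =====
-- from typing import Any, Dict, Iterable, List, Mapping, Sequence
--
-- def _cycle_signature(cycle: Sequence[str]) -> tuple[str, ...]:
--     nodes = [str(item) for item in cycle if str(item)]
--     if not nodes:
--         return ()
--     if len(nodes) > 1 and nodes[0] == nodes[-1]:
--         nodes = nodes[:-1]
--     if not nodes:
--         return ()
--     rotations: List[tuple[str, ...]] = []
--     for index in range(len(nodes)):
--         rotated = tuple(nodes[index:] + nodes[:index])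
--         rotations.append(rotated)
--         rotations.append(tuple(reversed(rotated)))
--     return min(rotations)
-- ===== SOURCE B (Python) =====
-- def _cycle_signature(cycle):
--     nodes = [str(item) for item in cycle if str(item)]
--     if not nodes:
--         return ()
--     if len(nodes) > 1 and nodes[0] == nodes[-1]:
--         nodes = nodes[:-1]
--     if not nodes:
--         return ()
--     n = len(nodes)
--     best = None
--     # Only a rotation that starts with the smallest label can be the minimum,
--     # so materialise just those, for the cycle and for its reversal.
--     for seq in (nodes, nodes[::-1]):
--         smallest = min(seq)
--         doubled = seq + seq
--         for index in range(n):
--             if seq[index] == smallest: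
--                 candidate = tuple(doubled[index:index + n])
--                 if best is None or candidate < best:
--                     best = candidate
--     return best
-- ===== Notes on version B (the rewrite author's own statement) =====
-- stated objective: faster
-- what changed: Instead of materialising all 2n rotations and their reversals and taking min over that list, B scans the cycle and its reversal once each and compares only the rotations (sliced from a doubled list) that start at an occurrence of the smallest label, keeping a running best.
import Mathlib
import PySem

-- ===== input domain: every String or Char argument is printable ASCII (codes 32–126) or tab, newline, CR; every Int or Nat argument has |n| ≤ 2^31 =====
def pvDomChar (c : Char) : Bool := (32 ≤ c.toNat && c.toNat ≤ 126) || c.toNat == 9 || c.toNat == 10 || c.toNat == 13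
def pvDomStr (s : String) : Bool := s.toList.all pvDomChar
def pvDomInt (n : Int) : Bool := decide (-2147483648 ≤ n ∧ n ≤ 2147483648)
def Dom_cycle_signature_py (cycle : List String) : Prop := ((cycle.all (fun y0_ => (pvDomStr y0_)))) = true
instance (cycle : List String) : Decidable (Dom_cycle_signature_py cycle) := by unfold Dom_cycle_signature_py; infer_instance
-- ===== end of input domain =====

-- B replaces A's "materialise all 2n rotations/reflections and take the min" by scanning, for the
-- cycle and its reversal, only the rotations that start at an occurrence of the smallest label.

-- ===== PORT A =====
-- literal transliteration of _cycle_signature: build every rotation and its reversal, take min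
def cycle_signature_py (cycle : List String) : List String :=
  let nodes := cycle.filter (fun item => item ≠ "")
  if nodes = [] then []
  else
    let nodes2 := if 1 < nodes.length ∧ PySem.List.pyGetD nodes 0 "" = PySem.List.pyGetD nodes (-1) ""
      then PySem.List.slice nodes none (some (-1)) else nodes
    if nodes2 = [] then []
    else
      let rotations := (PySem.List.pyRange 0 (nodes2.length : Int) 1).foldl
        (fun acc index =>
          (acc ++ [PySem.List.slice nodes2 (some index) none ++ PySem.List.slice nodes2 none (some index)])
            ++ [(PySem.List.slice nodes2 (some index) none ++ PySem.List.slice nodes2 none (some index)).reverse]) []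
      (PySem.List.min? rotations (fun x => x)).getD []

-- ===== PORT B =====
-- one pass over `seq`: only a rotation starting at an occurrence of min(seq) can be minimal,
-- so only those are cut out of the doubled list and compared against the running best
def pvBestOverSeq (n : Nat) (seq : List String) (best0 : Option (List String)) : Option (List String) :=
  let smallest := (PySem.List.min? seq (fun x => x)).getD ""
  let doubled := seq ++ seq
  (PySem.List.pyRange 0 (n : Int) 1).foldl
    (fun best index =>
      if PySem.List.pyGetD seq index "" = smallest then
        let candidate := PySem.List.slice doubled (some index) (some (index + (n : Int)))
        match best with
        | none => some candidate
        | some b => if candidate < b then some candidate else some b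
      else best) best0

def cycle_signature_py_alt (cycle : List String) : List String :=
  let nodes := cycle.filter (fun item => item ≠ "")
  if nodes = [] then []
  else
    let nodes2 := if 1 < nodes.length ∧ PySem.List.pyGetD nodes 0 "" = PySem.List.pyGetD nodes (-1) ""
      then PySem.List.slice nodes none (some (-1)) else nodes
    if nodes2 = [] then []
    else
      ([nodes2, nodes2.reverse].foldl (fun best seq => pvBestOverSeq nodes2.length seq best) none).getD []

-- ===== PRECONDITION & SPEC =====
def Spec_cycle_signature_py (cycle : List String) (out : List String) : Prop := out = cycle_signature_py_alt cycle
instance (cycle : List String) (out : List String) : Decidable (Spec_cycle_signature_py cycle out) := by unfold Spec_cycle_signature_py; infer_instance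

-- ===== CLAIM (what is proved, stated in full; the proofs are below) =====
def Claim_equal_cycle_signature_py : Prop := ∀ (cycle : List String), Dom_cycle_signature_py cycle → Spec_cycle_signature_py cycle (cycle_signature_py cycle)

-- ===== LEMMAS AND PROOFS =====

-- rotation of a list by k
def pvRot (seq : List String) (k : Nat) : List String := seq.drop k ++ seq.take k

-- the clean loop body that B's inner fold reduces to
def pvStep (seq : List String) (smallest : String) (best : Option (List String)) (k : Nat) : Option (List String) :=
  if seq.getD k "" = smallest then
    match best with
    | none => some (pvRot seq k)
    | some bb => if pvRot seq k < bb then some (pvRot seq k) else some bb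
  else best

-- spec of Python min()'s fold, at the instances the ports elaborate with
lemma pvMinAux {κ : Type} [LT κ] [DecidableLT κ]
    (htrans : ∀ a b c : κ, a < b → b < c → a < c)
    (hirr : ∀ a : κ, ¬ a < a)
    (htri : ∀ a b : κ, a < b ∨ a = b ∨ b < a) :
    ∀ (xs : List κ) (a : κ),
      ∃ m, xs.foldl (fun acc x => match acc with
            | none => some x
            | some mm => if x < mm then some x else some mm) (some a) = some m ∧
        (m = a ∨ m ∈ xs) ∧ ¬ a < m ∧ ∀ y ∈ xs, ¬ y < m := by
  intro xs
  induction xs with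
  | nil => intro a; exact ⟨a, rfl, Or.inl rfl, hirr a, by simp⟩
  | cons x t ih =>
    intro a
    rw [List.foldl_cons]
    by_cases hxa : x < a
    · obtain ⟨m, hm, hmem, hnlt, hall⟩ := ih x
      refine ⟨m, by simpa [hxa] using hm, ?_, ?_, ?_⟩
      · rcases hmem with h | h
        · exact Or.inr (h ▸ List.mem_cons_self)
        · exact Or.inr (List.mem_cons_of_mem _ h)
      · intro ham
        exact hnlt (htrans _ _ _ hxa ham)
      · intro y hy
        rcases List.mem_cons.mp hy with rfl | hy
        · exact hnlt
        · exact hall y hy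
    · obtain ⟨m, hm, hmem, hnlt, hall⟩ := ih a
      refine ⟨m, by simpa [hxa] using hm, ?_, hnlt, ?_⟩
      · rcases hmem with h | h
        · exact Or.inl h
        · exact Or.inr (List.mem_cons_of_mem _ h)
      · intro y hy
        rcases List.mem_cons.mp hy with rfl | hy
        · intro hym
          rcases htri a m with h1 | h1 | h1
          · exact hnlt h1
          · exact hxa (h1 ▸ hym)
          · exact hxa (htrans _ _ _ hym h1)
        · exact hall y hy

lemma pvMin?_spec {κ : Type} [LT κ] [DecidableLT κ]
    (htrans : ∀ a b c : κ, a < b → b < c → a < c)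
    (hirr : ∀ a : κ, ¬ a < a)
    (htri : ∀ a b : κ, a < b ∨ a = b ∨ b < a)
    (xs : List κ) (m : κ) (h : PySem.List.min? xs (fun x => x) = some m) :
    m ∈ xs ∧ ∀ y ∈ xs, ¬ y < m := by
  cases xs with
  | nil => simp [PySem.List.min?] at h
  | cons x t =>
    simp only [PySem.List.min?, List.foldl_cons] at h
    have h' : t.foldl (fun acc x => match acc with
            | none => some x
            | some mm => if x < mm then some x else some mm) (some x) = some m := h
    obtain ⟨m', hm', hmem, hnlt, hall⟩ := pvMinAux htrans hirr htri t x
    rw [hm'] at h'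
    obtain rfl : m' = m := Option.some.inj h'
    refine ⟨?_, ?_⟩
    · rcases hmem with h1 | h1
      · exact h1 ▸ List.mem_cons_self
      · exact List.mem_cons_of_mem _ h1
    · intro y hy
      rcases List.mem_cons.mp hy with rfl | hy
      · exact hnlt
      · exact hall y hy

-- A's rotations list, in closed form
lemma pvRotations_eq (ns : List String) :
    (PySem.List.pyRange 0 (ns.length : Int) 1).foldl
      (fun acc index =>
        (acc ++ [PySem.List.slice ns (some index) none ++ PySem.List.slice ns none (some index)])
          ++ [(PySem.List.slice ns (some index) none ++ PySem.List.slice ns none (some index)).reverse]) []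
    = (List.range ns.length).flatMap (fun k => [pvRot ns k, (pvRot ns k).reverse]) := by
  rw [PySem.List.pyRange_zero_natCast, List.foldl_map]
  rw [PySem.List.foldl_congr_mem _ _ (fun acc k => acc ++ [pvRot ns k, (pvRot ns k).reverse]) []
    (by
      intro acc k hk
      rw [PySem.List.slice_from ns (by positivity), PySem.List.slice_to ns (by positivity)]
      simp [pvRot, List.append_assoc])]
  rw [PySem.List.foldl_append_eq_flatMap]
  simp

-- B's candidate slice of the doubled list is a rotation
lemma pvCand_eq (seq : List String) (k : Nat) (hk : k ≤ seq.length) :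
    PySem.List.slice (seq ++ seq) (some (k : Int)) (some ((k : Int) + (seq.length : Int))) = pvRot seq k := by
  rw [PySem.List.slice_natCast_add, List.drop_append_of_le_length hk, List.take_append]
  rw [List.take_of_length_le (by simp)]
  unfold pvRot
  congr 1
  congr 1
  simp
  omega

lemma pvRot_reverse (ns : List String) (k : Nat) (hk : k ≤ ns.length) :
    (pvRot ns k).reverse = pvRot ns.reverse (ns.length - k) := by
  simp only [pvRot, List.reverse_append, List.drop_reverse, List.take_reverse]
  rw [Nat.sub_sub_self hk]

-- B's inner fold, rewritten to the clean step
lemma pvBestOverSeq_eq (n : Nat) (seq : List String) (b : Option (List String)) (hn : seq.length = n) :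
    pvBestOverSeq n seq b
    = (List.range n).foldl (pvStep seq ((PySem.List.min? seq (fun x => x)).getD "")) b := by
  subst hn
  unfold pvBestOverSeq
  rw [PySem.List.pyRange_zero_natCast, List.foldl_map]
  apply PySem.List.foldl_congr_mem
  intro acc k hk
  rw [List.mem_range] at hk
  rw [PySem.List.pyGetD_natCast, pvCand_eq seq k (le_of_lt hk)]
  cases acc <;> simp [pvStep, List.getD]

-- invariant of the clean fold
lemma pvLoop (seq : List String) (smallest : String) :
    ∀ (l : List Nat) (b : Option (List String)),
      (match l.foldl (pvStep seq smallest) b with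
       | none => b = none ∧ ∀ k ∈ l, seq.getD k "" ≠ smallest
       | some m =>
          (b = some m ∨ ∃ k, k ∈ l ∧ seq.getD k "" = smallest ∧ m = pvRot seq k) ∧
          (∀ b0, b = some b0 → ¬ b0 < m) ∧
          (∀ k ∈ l, seq.getD k "" = smallest → ¬ pvRot seq k < m)) := by
  intro l
  induction l with
  | nil =>
    intro b
    cases b with
    | none => exact ⟨rfl, by simp⟩
    | some bb =>
      refine ⟨Or.inl rfl, ?_, by simp⟩
      intro b0 hb0
      obtain rfl : bb = b0 := Option.some.inj hb0
      exact lt_irrefl _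
  | cons k l ih =>
    intro b
    rw [List.foldl_cons]
    have H := ih (pvStep seq smallest b k)
    by_cases hc : seq.getD k "" = smallest
    · cases b with
      | none =>
        have hb' : pvStep seq smallest none k = some (pvRot seq k) := by
          unfold pvStep; rw [if_pos hc]
        rw [hb'] at H ⊢
        cases hres : l.foldl (pvStep seq smallest) (some (pvRot seq k)) with
        | none => rw [hres] at H; exact absurd H.1 (by simp)
        | some m =>
          rw [hres] at H
          obtain ⟨H1, H2, H3⟩ := H
          have hrm : ¬ pvRot seq k < m := H2 _ rfl
          refine ⟨?_, by simp, ?_⟩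
          · rcases H1 with h1 | ⟨k', hk', hc', hm⟩
            · exact Or.inr ⟨k, List.mem_cons_self, hc, (Option.some.inj h1).symm⟩
            · exact Or.inr ⟨k', List.mem_cons_of_mem _ hk', hc', hm⟩
          · intro k'' hk'' hc''
            rcases List.mem_cons.mp hk'' with rfl | hk''
            · exact hrm
            · exact H3 k'' hk'' hc''
      | some bb =>
        by_cases hlt : pvRot seq k < bb
        · have hb' : pvStep seq smallest (some bb) k = some (pvRot seq k) := by
            unfold pvStep; rw [if_pos hc]; dsimp only; rw [if_pos hlt]
          rw [hb'] at H ⊢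
          cases hres : l.foldl (pvStep seq smallest) (some (pvRot seq k)) with
          | none => rw [hres] at H; exact absurd H.1 (by simp)
          | some m =>
            rw [hres] at H
            obtain ⟨H1, H2, H3⟩ := H
            have hrm : ¬ pvRot seq k < m := H2 _ rfl
            refine ⟨?_, ?_, ?_⟩
            · rcases H1 with h1 | ⟨k', hk', hc', hm⟩
              · exact Or.inr ⟨k, List.mem_cons_self, hc, (Option.some.inj h1).symm⟩
              · exact Or.inr ⟨k', List.mem_cons_of_mem _ hk', hc', hm⟩
            · intro b0 hb0
              obtain rfl : bb = b0 := Option.some.inj hb0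
              intro hbm
              exact hrm (List.lt_trans hlt hbm)
            · intro k'' hk'' hc''
              rcases List.mem_cons.mp hk'' with rfl | hk''
              · exact hrm
              · exact H3 k'' hk'' hc''
        · have hb' : pvStep seq smallest (some bb) k = some bb := by
            unfold pvStep; rw [if_pos hc]; dsimp only; rw [if_neg hlt]
          rw [hb'] at H ⊢
          cases hres : l.foldl (pvStep seq smallest) (some bb) with
          | none => rw [hres] at H; exact absurd H.1 (by simp)
          | some m =>
            rw [hres] at H
            obtain ⟨H1, H2, H3⟩ := H
            have hbm : ¬ bb < m := H2 _ rfl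
            refine ⟨?_, ?_, ?_⟩
            · rcases H1 with h1 | ⟨k', hk', hc', hm⟩
              · exact Or.inl h1
              · exact Or.inr ⟨k', List.mem_cons_of_mem _ hk', hc', hm⟩
            · intro b0 hb0
              obtain rfl : bb = b0 := Option.some.inj hb0
              exact hbm
            · intro k'' hk'' hc''
              rcases List.mem_cons.mp hk'' with rfl | hk''
              · intro hkm
                rcases lt_trichotomy bb m with h1 | h1 | h1
                · exact hbm h1
                · exact hlt (h1 ▸ hkm)
                · exact hlt (List.lt_trans hkm h1)
              · exact H3 k'' hk'' hc''
    · have hb' : pvStep seq smallest b k = b := by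
        unfold pvStep; rw [if_neg hc]
      rw [hb'] at H ⊢
      cases hres : l.foldl (pvStep seq smallest) b with
      | none =>
        rw [hres] at H
        exact ⟨H.1, fun k'' hk'' => by
          rcases List.mem_cons.mp hk'' with rfl | hk''
          · exact hc
          · exact H.2 k'' hk''⟩
      | some m =>
        rw [hres] at H
        obtain ⟨H1, H2, H3⟩ := H
        refine ⟨?_, H2, ?_⟩
        · rcases H1 with h1 | ⟨k', hk', hc', hm⟩
          · exact Or.inl h1
          · exact Or.inr ⟨k', List.mem_cons_of_mem _ hk', hc', hm⟩
        · intro k'' hk'' hc''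
          rcases List.mem_cons.mp hk'' with rfl | hk''
          · exact absurd hc'' hc
          · exact H3 k'' hk'' hc''

-- every rotation is dominated by a rotation starting at an occurrence of the minimum
lemma pvBridge (seq : List String) (smallest : String)
    (hmem : smallest ∈ seq) (hmin : ∀ y ∈ seq, ¬ y < smallest)
    (k : Nat) (hk : k < seq.length) :
    ∃ j, j < seq.length ∧ seq.getD j "" = smallest ∧
      (pvRot seq j = pvRot seq k ∨ pvRot seq j < pvRot seq k) := by
  by_cases hc : seq.getD k "" = smallest
  · exact ⟨k, hk, hc, Or.inl rfl⟩
  · obtain ⟨j, hj, hje⟩ := List.mem_iff_getElem.mp hmem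
    refine ⟨j, hj, by simp [List.getD, List.getElem?_eq_getElem hj, hje], Or.inr ?_⟩
    have hks : smallest < seq[k] := by
      rcases lt_trichotomy smallest seq[k] with h1 | h1 | h1
      · exact h1
      · exact absurd (by simp [List.getD, List.getElem?_eq_getElem hk, ← h1]) hc
      · exact absurd h1 (hmin _ (List.getElem_mem hk))
    have h1 : pvRot seq j = seq[j] :: (seq.drop (j+1) ++ seq.take j) := by
      rw [pvRot, List.drop_eq_getElem_cons hj, List.cons_append]
    have h2 : pvRot seq k = seq[k] :: (seq.drop (k+1) ++ seq.take k) := by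
      rw [pvRot, List.drop_eq_getElem_cons hk, List.cons_append]
    rw [h1, h2]
    exact List.Lex.rel (hje ▸ hks)

-- membership of a reversed-seq rotation in A's rotation set
lemma pvRevRot_mem (ns : List String) (k : Nat) (hk : k < ns.length) :
    pvRot ns.reverse k ∈ (List.range ns.length).flatMap (fun i => [pvRot ns i, (pvRot ns i).reverse]) := by
  rcases Nat.eq_zero_or_pos k with rfl | hk0
  · have h0 : pvRot ns.reverse 0 = (pvRot ns 0).reverse := by simp [pvRot]
    exact List.mem_flatMap.mpr ⟨0, List.mem_range.mpr (by omega), by rw [h0]; simp⟩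
  · have h1 : pvRot ns.reverse k = (pvRot ns (ns.length - k)).reverse := by
      rw [pvRot_reverse ns (ns.length - k) (by omega), Nat.sub_sub_self (le_of_lt hk)]
    exact List.mem_flatMap.mpr ⟨ns.length - k, List.mem_range.mpr (by omega), by rw [h1]; simp⟩

-- the core equality, on the normalised node list
lemma pvMain (ns : List String) (hne : ns ≠ []) :
    (PySem.List.min? ((List.range ns.length).flatMap (fun k => [pvRot ns k, (pvRot ns k).reverse])) (fun x => x)).getD []
    = ([ns, ns.reverse].foldl (fun best seq => pvBestOverSeq ns.length seq best) none).getD [] := by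
  have hn : 0 < ns.length := List.length_pos_iff.mpr hne
  have hStrans : ∀ a b c : String, a < b → b < c → a < c := fun a b c h1 h2 => lt_trans h1 h2
  have hSirr : ∀ a : String, ¬ a < a := fun a => lt_irrefl a
  have hStri : ∀ a b : String, a < b ∨ a = b ∨ b < a := fun a b => lt_trichotomy a b
  have hLtrans : ∀ a b c : List String, a < b → b < c → a < c := fun a b c h1 h2 => List.lt_trans h1 h2
  have hLirr : ∀ a : List String, ¬ a < a := fun a => lt_irrefl a
  have hLtri : ∀ a b : List String, a < b ∨ a = b ∨ b < a := fun a b => lt_trichotomy a b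
  -- B side: unfold the two-sequence fold
  simp only [List.foldl_cons, List.foldl_nil]
  rw [pvBestOverSeq_eq ns.length ns none rfl,
      pvBestOverSeq_eq ns.length ns.reverse _ (by simp)]
  -- smallest of ns and of its reversal
  cases hmin1 : PySem.List.min? ns (fun x => x) with
  | none => exact absurd ((PySem.List.min?_eq_none_iff ns _).mp hmin1) hne
  | some s1 =>
  obtain ⟨hs1mem, hs1min⟩ := pvMin?_spec hStrans hSirr hStri ns s1 hmin1
  cases hmin2 : PySem.List.min? ns.reverse (fun x => x) with
  | none =>
    exact absurd ((PySem.List.min?_eq_none_iff ns.reverse _).mp hmin2) (by simp [hne])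
  | some s2 =>
  obtain ⟨hs2mem, hs2min⟩ := pvMin?_spec hStrans hSirr hStri ns.reverse s2 hmin2
  simp only [Option.getD_some]
  -- first inner fold yields some m1
  have H1 := pvLoop ns s1 (List.range ns.length) none
  cases hr1 : (List.range ns.length).foldl (pvStep ns s1) none with
  | none =>
    rw [hr1] at H1
    obtain ⟨j, hj, hje⟩ := List.mem_iff_getElem.mp hs1mem
    exact absurd (by simp [List.getD, List.getElem?_eq_getElem hj, hje])
      (H1.2 j (List.mem_range.mpr hj))
  | some m1 =>
  rw [hr1] at H1
  obtain ⟨H11, _, H13⟩ := H1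
  have hm1 : ∃ k, k < ns.length ∧ ns.getD k "" = s1 ∧ m1 = pvRot ns k := by
    rcases H11 with h | ⟨k, hk, hck, hmk⟩
    · exact absurd h (by simp)
    · exact ⟨k, List.mem_range.mp hk, hck, hmk⟩
  -- second inner fold yields some m
  have H2 := pvLoop ns.reverse s2 (List.range ns.length) (some m1)
  cases hr2 : (List.range ns.length).foldl (pvStep ns.reverse s2) (some m1) with
  | none => rw [hr2] at H2; exact absurd H2.1 (by simp)
  | some m =>
  rw [hr2] at H2
  obtain ⟨H21, H22, H23⟩ := H2
  have hm1m : ¬ m1 < m := H22 m1 rfl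
  simp only [Option.getD_some]
  -- the candidates of the first fold also dominate m
  have H13' : ∀ k, k < ns.length → ns.getD k "" = s1 → ¬ pvRot ns k < m := by
    intro k hk hck hkm
    have h13 := H13 k (List.mem_range.mpr hk) hck
    rcases hLtri m m1 with h1 | h1 | h1
    · exact h13 (hLtrans _ _ _ hkm h1)
    · exact h13 (h1 ▸ hkm)
    · exact hm1m h1
  have H23' : ∀ k, k < ns.length → ns.reverse.getD k "" = s2 → ¬ pvRot ns.reverse k < m := by
    intro k hk hck
    exact H23 k (List.mem_range.mpr hk) hck
  -- m is in A's rotation set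
  have hmR : m ∈ (List.range ns.length).flatMap (fun k => [pvRot ns k, (pvRot ns k).reverse]) := by
    rcases H21 with h | ⟨k, hk, _, hmk⟩
    · obtain rfl : m1 = m := Option.some.inj h
      obtain ⟨k, hk, _, hmk⟩ := hm1
      exact List.mem_flatMap.mpr ⟨k, List.mem_range.mpr hk, by rw [hmk]; simp⟩
    · exact hmk ▸ pvRevRot_mem ns k (by simpa using List.mem_range.mp hk)
  -- A side: min? is some mA
  cases hminA : PySem.List.min?
      ((List.range ns.length).flatMap (fun k => [pvRot ns k, (pvRot ns k).reverse])) (fun x => x) with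
  | none =>
    rw [PySem.List.min?_eq_none_iff] at hminA
    exact absurd hminA (List.ne_nil_of_mem hmR)
  | some mA =>
  obtain ⟨hAmem, hAmin⟩ := pvMin?_spec hLtrans hLirr hLtri _ mA hminA
  simp only [Option.getD_some]
  -- ¬ m < mA
  have hnot1 : ¬ m < mA := hAmin m hmR
  -- ¬ mA < m, by the bridge
  have hnot2 : ¬ mA < m := by
    intro hAm
    obtain ⟨i, hi, hcase⟩ := List.mem_flatMap.mp hAmem
    rw [List.mem_range] at hi
    have hcase' : mA = pvRot ns i ∨ mA = (pvRot ns i).reverse := by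
      simpa using hcase
    rcases hcase' with rfl | rfl
    · obtain ⟨j, hj, hjc, hjr⟩ := pvBridge ns s1 hs1mem hs1min i hi
      have hjm := H13' j hj hjc
      rcases hjr with he | hl
      · exact hjm (he ▸ hAm)
      · exact hjm (hLtrans _ _ _ hl hAm)
    · have hrev : ∃ k, k < ns.length ∧ (pvRot ns i).reverse = pvRot ns.reverse k := by
        rcases Nat.eq_zero_or_pos i with rfl | hi0
        · exact ⟨0, hn, by simp [pvRot]⟩
        · exact ⟨ns.length - i, by omega, pvRot_reverse ns i (le_of_lt hi)⟩
      obtain ⟨k, hk, hkeq⟩ := hrev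
      rw [hkeq] at hAm
      obtain ⟨j, hj, hjc, hjr⟩ := pvBridge ns.reverse s2 hs2mem hs2min k (by simpa using hk)
      have hjm := H23' j (by simpa using hj) hjc
      rcases hjr with he | hl
      · exact hjm (he ▸ hAm)
      · exact hjm (hLtrans _ _ _ hl hAm)
  exact List.le_antisymm hnot1 hnot2

-- ===== VERDICT (by name: the statement is the Claim_ definition above) =====
theorem cycle_signature_py_spec : Claim_equal_cycle_signature_py := by
  intro cycle _
  unfold Spec_cycle_signature_py
  simp only [cycle_signature_py, cycle_signature_py_alt]
  by_cases h1 : cycle.filter (fun item => item ≠ "") = []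
  · rw [if_pos h1, if_pos h1]
  · rw [if_neg h1, if_neg h1]
    by_cases h2 : (if 1 < (cycle.filter (fun item => item ≠ "")).length ∧
        PySem.List.pyGetD (cycle.filter (fun item => item ≠ "")) 0 ""
          = PySem.List.pyGetD (cycle.filter (fun item => item ≠ "")) (-1) ""
      then PySem.List.slice (cycle.filter (fun item => item ≠ "")) none (some (-1))
      else cycle.filter (fun item => item ≠ "")) = []
    · rw [if_pos h2, if_pos h2]
    · rw [if_neg h2, if_neg h2, pvRotations_eq]
      exact pvMain _ h2
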